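-- pv_equiv track=rewrite | github.com/davidstone/technical-machine | statistics_scripts/smogon.py | parse_lines_by_pokemon
-- ===== SOURCE A (Python) =====
-- separator = '----------------------------------------'
--
-- def find_separators(lines):
-- 	separators = []
-- 	index = 0
-- 	for line in lines:
-- 		if line == separator:
-- 			separators += [index]
-- 		index += 1
-- 	return separators
--
-- def parse_lines_by_pokemon(lines):
-- 	separators = find_separators(lines)
-- 	pokemon_info = []
-- 	data_by_pokemon = []
-- 	for index in range(0, len(separators) - 1):
-- 		initial_separator = separators[index]
-- 		final_separator = separators[index + 1]
-- 		data = lines[initial_separator + 1:final_separator]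
-- 		if data != []:
-- 			data_by_pokemon += [data]
-- 		else:
-- 			pokemon_info += [data_by_pokemon]
-- 			data_by_pokemon = []
-- 	return pokemon_info
-- ===== SOURCE B (Python) =====
-- separator = '----------------------------------------'
--
-- def parse_lines_by_pokemon(lines):
-- 	result = []
-- 	group = []
-- 	segment = []
-- 	seen = False
-- 	for line in lines:
-- 		if line == separator:
-- 			if seen:
-- 				if segment:
-- 					group.append(segment)
-- 				else:
-- 					result.append(group)
-- 					group = []
-- 				segment = []
-- 			else:
-- 				seen = True
-- 		elif seen:
-- 			segment.append(line)
-- 	return result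
-- ===== Notes on version B (the rewrite author's own statement) =====
-- stated objective: idiomatic
-- what changed: Replaced the two-pass design (collect all separator indices, then slice between consecutive pairs) with a single streaming pass over the lines that maintains a seen-first-separator flag, a current segment buffer and a current group, flushing at each subsequent separator.
import Mathlib
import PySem

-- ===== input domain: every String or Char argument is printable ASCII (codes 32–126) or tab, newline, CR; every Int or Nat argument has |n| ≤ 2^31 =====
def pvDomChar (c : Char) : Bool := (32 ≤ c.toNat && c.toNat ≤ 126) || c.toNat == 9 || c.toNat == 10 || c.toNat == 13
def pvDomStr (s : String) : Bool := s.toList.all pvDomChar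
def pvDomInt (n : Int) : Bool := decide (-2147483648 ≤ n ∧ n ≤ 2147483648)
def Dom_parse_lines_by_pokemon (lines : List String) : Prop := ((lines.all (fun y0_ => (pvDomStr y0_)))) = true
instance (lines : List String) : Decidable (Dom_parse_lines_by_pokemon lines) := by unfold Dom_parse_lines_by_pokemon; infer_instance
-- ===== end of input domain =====

-- B replaces A's two-pass design (collect separator indices, then slice between consecutive
-- pairs) with a single streaming pass that buffers the current segment and group (idiomatic).

-- ===== PORT A =====
def pySeparator : String := "----------------------------------------"

def find_separators (lines : List String) : List Int :=
  (lines.foldl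
    (fun (st : List Int × Int) line =>
      ((if line = pySeparator then st.1 ++ [st.2] else st.1), st.2 + 1))
    ([], 0)).1

def parse_lines_by_pokemon (lines : List String) : List (List (List String)) :=
  let separators := find_separators lines
  ((PySem.List.pyRange 0 ((separators.length : Int) - 1) 1).foldl
    (fun (st : List (List (List String)) × List (List String)) index =>
      -- index is always in range here (index + 1 < len(separators)), so pyGetD is exact
      let initial_separator := PySem.List.pyGetD separators index 0
      let final_separator := PySem.List.pyGetD separators (index + 1) 0
      let data := PySem.List.slice lines (some (initial_separator + 1)) (some final_separator)
      if data ≠ [] then (st.1, st.2 ++ [data]) else (st.1 ++ [st.2], []))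
    ([], [])).1

-- ===== PORT B =====
def parse_lines_by_pokemon_alt (lines : List String) : List (List (List String)) :=
  (lines.foldl
    (fun (st : List (List (List String)) × List (List String) × List String × Bool) line =>
      let (result, group, segment, seen) := st
      if line = pySeparator then
        if seen then
          if segment ≠ [] then (result, group ++ [segment], [], seen)
          else (result ++ [group], [], [], seen)
        else (result, group, segment, true)
      else if seen then (result, group, segment ++ [line], seen)
      else st)
    ([], [], [], false)).1

-- ===== PRECONDITION & SPEC =====
def Spec_parse_lines_by_pokemon (lines : List String) (out : List (List (List String))) : Prop := out = parse_lines_by_pokemon_alt lines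
instance (lines : List String) (out : List (List (List String))) : Decidable (Spec_parse_lines_by_pokemon lines out) := by unfold Spec_parse_lines_by_pokemon; infer_instance

-- ===== CLAIM (what is proved, stated in full; the proofs are below) =====
def Claim_equal_parse_lines_by_pokemon : Prop := ∀ (lines : List String), Dom_parse_lines_by_pokemon lines → Spec_parse_lines_by_pokemon lines (parse_lines_by_pokemon lines)

-- ===== LEMMAS AND PROOFS =====

-- the "flush one segment" step both loops perform on the pair (finished groups, current group)
def pvF (st : List (List (List String)) × List (List String)) (s : List String) :
    List (List (List String)) × List (List String) :=
  if s ≠ [] then (st.1, st.2 ++ [s]) else (st.1 ++ [st.2], [])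

-- segments between consecutive separators of xs, assuming a separator was just read
def pvSegs : List String → List (List String)
  | [] => []
  | x :: xs =>
    if x = pySeparator then [] :: pvSegs xs
    else match pvSegs xs with
      | [] => []
      | s :: rest => (x :: s) :: rest

-- segments of the whole input: everything before the first separator is dropped
def pvBody : List String → List (List String)
  | [] => []
  | x :: xs => if x = pySeparator then pvSegs xs else pvBody xs

def pvPre (buf : List String) : List (List String) → List (List String)
  | [] => []
  | s :: rest => (buf ++ s) :: rest

-- the (Nat) indices of the separators
def pvSep : List String → List Nat
  | [] => []
  | x :: xs =>
    if x = pySeparator then 0 :: (pvSep xs).map (· + 1) else (pvSep xs).map (· + 1)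

def pvBStep (st : List (List (List String)) × List (List String) × List String × Bool)
    (line : String) : List (List (List String)) × List (List String) × List String × Bool :=
  let (result, group, segment, seen) := st
  if line = pySeparator then
    if seen then
      if segment ≠ [] then (result, group ++ [segment], [], seen)
      else (result ++ [group], [], [], seen)
    else (result, group, segment, true)
  else if seen then (result, group, segment ++ [line], seen)
  else st

theorem pvAlt_eq_foldl (lines : List String) :
    parse_lines_by_pokemon_alt lines = (lines.foldl pvBStep ([], [], [], false)).1 := rfl

theorem pvPre_nil (l : List (List String)) : pvPre [] l = l := by
  cases l <;> simp [pvPre]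

theorem pvPre_shift (x : String) (hx : ¬ x = pySeparator) (buf : List String)
    (xs : List String) : pvPre buf (pvSegs (x :: xs)) = pvPre (buf ++ [x]) (pvSegs xs) := by
  cases h : pvSegs xs <;> simp [pvSegs, hx, h, pvPre]

theorem pvB_loop (xs : List String) : ∀ (res : List (List (List String)))
    (grp : List (List String)) (buf : List String),
    (xs.foldl pvBStep (res, grp, buf, true)).1
      = ((pvPre buf (pvSegs xs)).foldl pvF (res, grp)).1 := by
  induction xs with
  | nil => intro res grp buf; simp [pvSegs, pvPre]
  | cons x xs ih =>
    intro res grp buf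
    by_cases hx : x = pySeparator
    · subst hx
      have hstep : pvBStep (res, grp, buf, true) pySeparator
          = ((pvF (res, grp) buf).1, (pvF (res, grp) buf).2, [], true) := by
        by_cases hb : buf = [] <;> simp [pvBStep, pvF, hb]
      rw [List.foldl_cons, hstep, ih, pvPre_nil]
      have h2 : pvPre buf (pvSegs (pySeparator :: xs)) = buf :: pvSegs xs := by
        simp [pvSegs, pvPre]
      rw [h2, List.foldl_cons]
    · have hstep : pvBStep (res, grp, buf, true) x = (res, grp, buf ++ [x], true) := by
        simp [pvBStep, hx]
      rw [List.foldl_cons, hstep, ih, pvPre_shift x hx]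

theorem pvB_eq (lines : List String) :
    parse_lines_by_pokemon_alt lines = ((pvBody lines).foldl pvF ([], [])).1 := by
  rw [pvAlt_eq_foldl]
  induction lines with
  | nil => simp [pvBody]
  | cons x xs ih =>
    by_cases hx : x = pySeparator
    · subst hx
      have hstep : pvBStep ([], [], [], false) pySeparator = ([], [], [], true) := by
        simp [pvBStep]
      rw [List.foldl_cons, hstep, pvB_loop, pvPre_nil]
      simp [pvBody]
    · have hstep : pvBStep ([], [], [], false) x = ([], [], [], false) := by
        simp [pvBStep, hx]
      rw [List.foldl_cons, hstep, ih]
      simp [pvBody, hx]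

-- characterisation of find_separators
def pvFStep (st : List Int × Int) (line : String) : List Int × Int :=
  ((if line = pySeparator then st.1 ++ [st.2] else st.1), st.2 + 1)

theorem pvFind_foldl (lines : List String) :
    find_separators lines = (lines.foldl pvFStep ([], 0)).1 := rfl

theorem pvFind_aux (lines : List String) : ∀ (acc : List Int) (k : Int),
    (lines.foldl pvFStep (acc, k)).1
      = acc ++ (pvSep lines).map (fun (j : Nat) => (j : Int) + k) := by
  induction lines with
  | nil => intro acc k; simp [pvSep]
  | cons x xs ih =>
    intro acc k
    by_cases hx : x = pySeparator
    · have hstep : pvFStep (acc, k) x = (acc ++ [k], k + 1) := by simp [pvFStep, hx]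
      rw [List.foldl_cons, hstep, ih]
      have hsep : pvSep (x :: xs) = 0 :: (pvSep xs).map (· + 1) := by simp [pvSep, hx]
      rw [hsep, List.map_cons, List.map_map]
      have h0 : ((0 : Nat) : Int) + k = k := by simp
      rw [h0]
      conv_rhs => rw [List.append_cons]
      congr 1
      apply List.map_congr_left
      intro j _
      simp [Function.comp]
      ring
    · have hstep : pvFStep (acc, k) x = (acc, k + 1) := by simp [pvFStep, hx]
      rw [List.foldl_cons, hstep, ih]
      have hsep : pvSep (x :: xs) = (pvSep xs).map (· + 1) := by simp [pvSep, hx]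
      rw [hsep, List.map_map]
      congr 1
      apply List.map_congr_left
      intro j _
      simp [Function.comp]
      ring

theorem pvFind_eq (lines : List String) :
    find_separators lines = (pvSep lines).map (fun (j : Nat) => (j : Int)) := by
  rw [pvFind_foldl]
  have := pvFind_aux lines [] 0
  simpa using this

theorem pvSegs_nil_of (xs : List String) (h : pvSep xs = []) : pvSegs xs = [] := by
  induction xs with
  | nil => simp [pvSegs]
  | cons x xs ih =>
    by_cases hx : x = pySeparator
    · simp [pvSep, hx] at h
    · simp [pvSep, hx, List.map_eq_nil_iff] at h
      simp [pvSegs, hx, ih h]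

theorem pvBody_nil_of (xs : List String) (h : pvSep xs = []) : pvBody xs = [] := by
  induction xs with
  | nil => simp [pvBody]
  | cons x xs ih =>
    by_cases hx : x = pySeparator
    · simp [pvSep, hx] at h
    · simp [pvSep, hx, List.map_eq_nil_iff] at h
      simp [pvBody, hx, ih h]

theorem pvSegs_cons_of (xs : List String) : ∀ (j : Nat) (s' : List Nat),
    pvSep xs = j :: s' → pvSegs xs = xs.take j :: pvBody xs := by
  induction xs with
  | nil => intro j s' h; simp [pvSep] at h
  | cons x xs ih =>
    intro j s' h
    by_cases hx : x = pySeparator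
    · have hsep : pvSep (x :: xs) = 0 :: (pvSep xs).map (· + 1) := by simp [pvSep, hx]
      rw [hsep] at h
      injection h with h1 h2
      subst h1
      simp [pvSegs, pvBody, hx]
    · have hsep : pvSep (x :: xs) = (pvSep xs).map (· + 1) := by simp [pvSep, hx]
      rw [hsep] at h
      cases hs : pvSep xs with
      | nil => rw [hs] at h; simp at h
      | cons j0 t =>
        rw [hs, List.map_cons] at h
        injection h with h1 h2
        have hseg := ih j0 t hs
        subst h1
        simp [pvSegs, pvBody, hx, hseg, List.take_succ_cons]

-- shifting all separator indices by one
theorem pvZipShift (j : Nat) (s' : List Nat) :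
    (((j + 1) :: s'.map (· + 1)).zip (s'.map (· + 1)))
      = ((j :: s').zip s').map (Prod.map (· + 1) (· + 1)) := by
  rw [show ((j + 1) :: s'.map (· + 1)) = (j :: s').map (· + 1) from rfl, List.zip_map]

theorem pvSliceShift (x : String) (xs : List String) (l : List (Nat × Nat)) :
    ((l.map (Prod.map (· + 1) (· + 1))).map
        (fun p => ((x :: xs).drop (p.1 + 1)).take (p.2 - (p.1 + 1))))
      = l.map (fun p => (xs.drop (p.1 + 1)).take (p.2 - (p.1 + 1))) := by
  rw [List.map_map]
  apply List.map_congr_left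
  intro p _
  have h2 : p.2 + 1 - (p.1 + 1 + 1) = p.2 - (p.1 + 1) := by omega
  simp [Prod.map, h2]

-- the list of slices A takes between consecutive separators is exactly the segment list
theorem pvM0 (lines : List String) :
    (((pvSep lines).zip (pvSep lines).tail).map
        (fun p => (lines.drop (p.1 + 1)).take (p.2 - (p.1 + 1))))
      = pvBody lines := by
  induction lines with
  | nil => simp [pvSep, pvBody]
  | cons x xs ih =>
    by_cases hx : x = pySeparator
    · have hsep : pvSep (x :: xs) = 0 :: (pvSep xs).map (· + 1) := by simp [pvSep, hx]
      cases hs : pvSep xs with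
      | nil => subst hx; simp [hsep, hs, pvBody, pvSegs_nil_of xs hs]
      | cons j s' =>
        subst hx
        rw [hsep, hs, List.map_cons, List.tail_cons, List.zip_cons_cons, List.map_cons,
          pvZipShift j s', pvSliceShift _ xs]
        have hz : (j :: s').zip s' = (pvSep xs).zip (pvSep xs).tail := by rw [hs]; rfl
        rw [hz, ih]
        have hseg := pvSegs_cons_of xs j s' hs
        simp [pvBody, hseg]
    · have hsep : pvSep (x :: xs) = (pvSep xs).map (· + 1) := by simp [pvSep, hx]
      cases hs : pvSep xs with
      | nil => simp [hsep, hs, pvBody, hx, ← ih]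
      | cons j s' =>
        rw [hsep, hs, List.map_cons, List.tail_cons, pvZipShift j s', pvSliceShift x xs]
        have hz : (j :: s').zip s' = (pvSep xs).zip (pvSep xs).tail := by rw [hs]; rfl
        rw [hz, ih]
        simp [pvBody, hx]

def pvAStep (separators : List Int) (lines : List String)
    (st : List (List (List String)) × List (List String)) (index : Int) :
    List (List (List String)) × List (List String) :=
  let initial_separator := PySem.List.pyGetD separators index 0
  let final_separator := PySem.List.pyGetD separators (index + 1) 0
  let data := PySem.List.slice lines (some (initial_separator + 1)) (some final_separator)
  if data ≠ [] then (st.1, st.2 ++ [data]) else (st.1 ++ [st.2], [])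

theorem pvA_foldl (lines : List String) :
    parse_lines_by_pokemon lines =
      ((PySem.List.pyRange 0 (((find_separators lines).length : Int) - 1) 1).foldl
        (pvAStep (find_separators lines) lines) ([], [])).1 := rfl

theorem pvA_eq (lines : List String) :
    parse_lines_by_pokemon lines = ((pvBody lines).foldl pvF ([], [])).1 := by
  cases hs : pvSep lines with
  | nil =>
    have h1 : find_separators lines = [] := by rw [pvFind_eq, hs]; rfl
    simp only [parse_lines_by_pokemon, h1]
    rw [PySem.List.pyRange_one_eq_nil (by norm_num)]
    rw [pvBody_nil_of lines hs]
    rfl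
  | cons j s' =>
    have h1 : find_separators lines = (j :: s').map (fun (i : Nat) => (i : Int)) := by
      rw [pvFind_eq, hs]
    rw [pvA_foldl, h1]
    set S : List Int := (j :: s').map (fun (i : Nat) => (i : Int)) with hS
    set L : List (List String) := ((j :: s').zip s').map
        (fun p => (lines.drop (p.1 + 1)).take (p.2 - (p.1 + 1))) with hL
    have hLlen : L.length = s'.length := by rw [hL]; simp
    have hlen : ((S.length : Int) - 1) = (L.length : Int) := by
      rw [hS]
      simp [hLlen]
    rw [hlen]
    have hcong : List.foldl (pvAStep S lines) ([], []) (PySem.List.pyRange 0 ((L.length : Int)) 1)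
        = List.foldl (fun acc i => pvF acc (PySem.List.pyGetD L i []))
            ([], []) (PySem.List.pyRange 0 ((L.length : Int)) 1) := by
      apply PySem.List.foldl_congr_mem
      intro acc i hi
      rw [PySem.List.mem_pyRange_one] at hi
      obtain ⟨hi0, hi1⟩ := hi
      obtain ⟨n, rfl⟩ := Int.eq_ofNat_of_zero_le hi0
      have hn : n < L.length := by exact_mod_cast hi1
      have hn' : n < s'.length := by omega
      have hjn : n < (j :: s').length := by simp; omega
      have hjn1 : n + 1 < (j :: s').length := by simp; omega
      show pvF acc (PySem.List.slice lines (some (PySem.List.pyGetD S (n : Int) 0 + 1))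
          (some (PySem.List.pyGetD S ((n : Int) + 1) 0)))
        = pvF acc (PySem.List.pyGetD L (n : Int) [])
      congr 1
      have e1 : PySem.List.pyGetD S (n : Int) 0 = (((j :: s')[n]'hjn : Nat) : Int) := by
        rw [PySem.List.pyGetD_natCast, hS, List.getD_eq_getElem _ _ (by simpa using hjn)]
        exact List.getElem_map _
      have e2 : PySem.List.pyGetD S ((n : Int) + 1) 0 = (((j :: s')[n + 1]'hjn1 : Nat) : Int) := by
        rw [show ((n : Int) + 1) = ((n + 1 : Nat) : Int) by push_cast; ring]
        rw [PySem.List.pyGetD_natCast, hS, List.getD_eq_getElem _ _ (by simpa using hjn1)]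
        exact List.getElem_map _
      have e3 : PySem.List.pyGetD L (n : Int) []
          = List.take (s'[n]'hn' - ((j :: s')[n]'hjn + 1))
              (List.drop ((j :: s')[n]'hjn + 1) lines) := by
        rw [PySem.List.pyGetD_natCast, List.getD_eq_getElem _ _ hn]
        simp only [hL, List.getElem_map, List.getElem_zip]
      rw [e1, e2, e3]
      rw [show (((j :: s')[n]'hjn : Nat) : Int) + 1 = (((j :: s')[n]'hjn + 1 : Nat) : Int) by
        push_cast; ring]
      rw [PySem.List.slice_natCast]
      rw [List.getElem_cons_succ]
    rw [hcong, PySem.List.foldl_pyRange_zero_pyGetD' L [] pvF ([], [])]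
    have hLB : L = pvBody lines := by rw [hL, ← pvM0 lines, hs]; rfl
    rw [hLB]

-- ===== VERDICT (by name: the statement is the Claim_ definition above) =====
theorem parse_lines_by_pokemon_spec : Claim_equal_parse_lines_by_pokemon := by
  intro lines _
  unfold Spec_parse_lines_by_pokemon
  rw [pvA_eq, pvB_eq]
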